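-- pv_equiv track=rewrite | github.com/Taylor-eOS/json-lines-tools | tool_space_correction.py | apply_decisions
-- ===== SOURCE A (Python) =====
-- def tokenize_line(line):
--     result = []
--     current = ""
--     for char in line:
--         if char == ',':
--             if current:
--                 result.append(current)
--                 current = ""
--             result.append(',')
--         elif char == ' ':
--             if current:
--                 result.append(current)
--                 current = ""
--         else:
--             current += char
--     if current:
--         result.append(current)
--     return result
--
-- def apply_decisions(lines, decisions):
--     new_lines = []
--     for line in lines:
--         tokens = tokenize_line(line)
--         i = 0
--         new_tokens = []
--         while i < len(tokens):
--             if tokens[i] == ',':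
--                 new_tokens.append(',')
--                 i += 1
--                 continue
--             if i < len(tokens) - 1 and tokens[i + 1] != ',':
--                 key = (tokens[i].lower(), tokens[i + 1].lower())
--                 if key in decisions and decisions[key] == "merge":
--                     new_tokens.append(tokens[i] + tokens[i + 1])
--                     i += 2
--                     continue
--             new_tokens.append(tokens[i])
--             i += 1
--         result = ""
--         for j in range(len(new_tokens)):
--             if new_tokens[j] == ',':
--                 result += ','
--                 if j < len(new_tokens) - 1:
--                     result += ' '
--             else:
--                 if j > 0 and new_tokens[j - 1] != ',':
--                     result += ' '
--                 result += new_tokens[j]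
--         new_lines.append(result)
--     return new_lines
-- ===== SOURCE B (Python) =====
-- def _tokens(line):
--     return [t for t in line.replace(',', ' , ').split(' ') if t]
--
-- def _merge(toks, decisions):
--     out = []
--     skip = False
--     for cur, nxt in zip(toks, toks[1:] + [',']):
--         if skip:
--             skip = False
--         elif cur != ',' and nxt != ',' and decisions.get((cur.lower(), nxt.lower())) == "merge":
--             out.append(cur + nxt)
--             skip = True
--         else:
--             out.append(cur)
--     return out
--
-- def _join(toks):
--     pieces = toks[:1]
--     for prev, cur in zip(toks, toks[1:]):
--         pieces.append(cur if cur == ',' and prev != ',' else ' ' + cur)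
--     return ''.join(pieces)
--
-- def apply_decisions(lines, decisions):
--     return [_join(_merge(_tokens(line), decisions)) for line in lines]
-- ===== Notes on version B (the rewrite author's own statement) =====
-- stated objective: idiomatic
-- what changed: B replaces A's character-by-character tokenizer state machine with line.replace(',', ' , ').split(' ') plus an empty-token filter, replaces A's index-jumping while-loop merge with a single pass over zip(toks, toks[1:]+[',']) using a skip flag, and rebuilds each line as a list of pieces with explicitly computed separators joined by ''.join instead of A's index-conditional string concatenation.
import Mathlib
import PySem

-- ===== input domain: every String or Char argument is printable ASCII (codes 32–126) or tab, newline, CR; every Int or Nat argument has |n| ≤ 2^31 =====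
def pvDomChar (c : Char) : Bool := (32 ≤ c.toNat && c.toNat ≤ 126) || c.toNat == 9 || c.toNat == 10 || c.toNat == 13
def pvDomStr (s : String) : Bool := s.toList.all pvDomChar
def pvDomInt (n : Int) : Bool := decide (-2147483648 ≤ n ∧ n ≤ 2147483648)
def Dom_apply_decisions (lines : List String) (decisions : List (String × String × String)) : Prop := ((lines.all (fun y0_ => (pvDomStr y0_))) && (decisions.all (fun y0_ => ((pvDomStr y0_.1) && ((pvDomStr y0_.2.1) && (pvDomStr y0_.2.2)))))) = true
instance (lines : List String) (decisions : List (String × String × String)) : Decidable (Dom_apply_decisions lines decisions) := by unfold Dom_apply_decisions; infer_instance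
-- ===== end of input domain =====

-- B replaces A's character-by-character tokenizer state machine by replace+split, A's index-jumping
-- while-merge by a single zip/skip-flag pass, and A's index-conditional string concatenation by an
-- explicit pieces-list join (objective: idiomatic; return values proved identical on all inputs).

-- Python str concatenation (s + t), shared marshalling helper of both ports (exact: code-point append)
def pvCat (a b : String) : String := String.ofList (a.toList ++ b.toList)

-- dict[(k1,k2)] lookup on the association-list marshalling of `decisions` (first match), shared by both ports
def pvLookup (decisions : List (String × String × String)) (k : String × String) : Option String :=
  (decisions.find? (fun kv => kv.1 == k.1 && kv.2.1 == k.2)).map (·.2.2)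

-- ===== PORT A =====
-- tokenize_line: the character state machine; `current` (a Python str built by +=) is its list of chars
def tokStepA (st : List (List Char) × List Char) (c : Char) : List (List Char) × List Char :=
  if c = ',' then ((if st.2 ≠ [] then st.1 ++ [st.2] else st.1) ++ [[',']], [])
  else if c = ' ' then (if st.2 ≠ [] then (st.1 ++ [st.2], []) else st)
  else (st.1, st.2 ++ [c])

def tokenize_line (line : String) : List String :=
  let st := line.toList.foldl tokStepA ([], [])
  (if st.2 ≠ [] then st.1 ++ [st.2] else st.1).map String.ofList

-- the `while i < len(tokens)` merge loop, recursion on the loop counter i, accumulating new_tokens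
def mergeAGo (decisions : List (String × String × String)) (tokens : List String)
    (i : Nat) (acc : List String) : List String :=
  if h : i < tokens.length then
    let t := tokens.getD i ""
    if t = "," then mergeAGo decisions tokens (i + 1) (acc ++ [","])
    else if i < tokens.length - 1 ∧ tokens.getD (i + 1) "" ≠ "," ∧
        pvLookup decisions (PySem.Str.lower t, PySem.Str.lower (tokens.getD (i + 1) "")) = some "merge" then
      mergeAGo decisions tokens (i + 2) (acc ++ [pvCat t (tokens.getD (i + 1) "")])
    else mergeAGo decisions tokens (i + 1) (acc ++ [t])
  else acc
termination_by tokens.length - i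

-- body of `for j in range(len(new_tokens))` building `result`
def joinAStep (new_tokens : List String) (n : Nat) (result : String) (j : Nat) : String :=
  if new_tokens.getD j "" = "," then
    let r := pvCat result ","
    if j < n - 1 then pvCat r " " else r
  else
    let r := if 0 < j ∧ new_tokens.getD (j - 1) "" ≠ "," then pvCat result " " else result
    pvCat r (new_tokens.getD j "")

def apply_decisions (lines : List String) (decisions : List (String × String × String)) : List String :=
  lines.map (fun line =>
    let tokens := tokenize_line line
    let new_tokens := mergeAGo decisions tokens 0 []
    (List.range new_tokens.length).foldl (joinAStep new_tokens new_tokens.length) "")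

-- ===== PORT B =====
def apply_decisions_alt (lines : List String) (decisions : List (String × String × String)) : List String :=
  lines.map (fun line =>
    let toks := ((PySem.Str.split? (PySem.Str.replace line "," " , ") " ").getD []).filter (fun t => t ≠ "")
    let merged := ((toks.zip (toks.drop 1 ++ [","])).foldl
      (fun (st : List String × Bool) p =>
        if st.2 then (st.1, false)
        else if p.1 ≠ "," ∧ p.2 ≠ "," ∧
            pvLookup decisions (PySem.Str.lower p.1, PySem.Str.lower p.2) = some "merge" then
          (st.1 ++ [pvCat p.1 p.2], true)
        else (st.1 ++ [p.1], false)) ([], false)).1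
    let pieces := merged.take 1 ++ (merged.zip (merged.drop 1)).map
      (fun p => if p.2 = "," ∧ p.1 ≠ "," then p.2 else pvCat " " p.2)
    PySem.Str.join "" pieces)

-- ===== PRECONDITION & SPEC =====
def Spec_apply_decisions (lines : List String) (decisions : List (String × String × String)) (out : List String) : Prop := out = apply_decisions_alt lines decisions
instance (lines : List String) (decisions : List (String × String × String)) (out : List String) : Decidable (Spec_apply_decisions lines decisions out) := by unfold Spec_apply_decisions; infer_instance

-- ===== CLAIM (what is proved, stated in full; the proofs are below) =====
def Claim_equal_apply_decisions : Prop := ∀ (lines : List String) (decisions : List (String × String × String)), Dom_apply_decisions lines decisions → Spec_apply_decisions lines decisions (apply_decisions lines decisions)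

-- ===== LEMMAS AND PROOFS =====

-- common tokenizer specification (A's state machine, written as recursion on the char list)
def tokSpec (cur : List Char) : List Char → List (List Char)
  | [] => if cur ≠ [] then [cur] else []
  | c :: cs =>
    if c = ',' then (if cur ≠ [] then [cur] else []) ++ [[',']] ++ tokSpec [] cs
    else if c = ' ' then (if cur ≠ [] then [cur] else []) ++ tokSpec [] cs
    else tokSpec (cur ++ [c]) cs

def tokFinish (st : List (List Char) × List Char) : List (List Char) :=
  if st.2 ≠ [] then st.1 ++ [st.2] else st.1

theorem tokA_eq_tokSpec (cs : List Char) : ∀ (res : List (List Char)) (cur : List Char),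
    tokFinish (cs.foldl tokStepA (res, cur)) = res ++ tokSpec cur cs := by
  induction cs with
  | nil => intro res cur; simp [tokFinish, tokSpec]; split_ifs <;> simp
  | cons c cs ih =>
    intro res cur
    simp only [List.foldl_cons, tokStepA, tokSpec]
    by_cases hc : c = ','
    · simp [hc, ih]; split_ifs <;> simp
    · by_cases hs : c = ' '
      · simp only [if_neg hc, if_pos hs, hs, ih]
        by_cases hcur : cur = []
        · simp [hcur, ih]
        · simp [hcur, ih]
      · simp [hc, hs, ih]

-- Python " ".split-semantics of PySem.Chars.splitOn for a one-char separator
def mysplit (d : Char) : List Char → List Char → List (List Char)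
  | [], pre => [pre]
  | c :: rest, pre => if c = d then pre :: mysplit d rest [] else mysplit d rest (pre ++ [c])

theorem splitOn_go_eq (d : Char) (fuel : Nat) : ∀ (l cur : List Char) (acc : List (List Char)),
    l.length ≤ fuel →
    PySem.Chars.splitOn.go [d] fuel l cur acc = acc.reverse ++ mysplit d l cur.reverse := by
  induction fuel with
  | zero =>
    intro l cur acc h
    have : l = [] := by cases l <;> simp_all
    subst this
    simp [PySem.Chars.splitOn.go, mysplit]
  | succ fuel ih =>
    intro l cur acc h
    cases l with
    | nil => simp [PySem.Chars.splitOn.go, mysplit]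
    | cons c rest =>
      rw [PySem.Chars.splitOn.go]
      simp only [List.length_cons] at h
      by_cases hc : c = d
      · subst hc
        simp only [List.isPrefixOf, BEq.rfl, Bool.true_and, if_true, List.length_cons,
          List.drop_succ_cons, mysplit, List.length_nil, List.drop_zero]
        rw [ih rest [] (cur.reverse :: acc) (by omega)]
        simp
      · have hpre : [d].isPrefixOf (c :: rest) = false := by
          simp [List.isPrefixOf, beq_eq_false_iff_ne]; exact fun hh => hc hh.symm
        simp only [hpre, if_false, Bool.false_eq_true, mysplit, if_neg hc]
        rw [ih rest (c :: cur) acc (by omega)]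
        simp

theorem splitOn_eq (d : Char) (s : List Char) :
    PySem.Chars.splitOn s [d] = mysplit d s [] := by
  have := splitOn_go_eq d (s.length + 1) s [] [] (by omega)
  simpa [PySem.Chars.splitOn] using this

-- Python replace-semantics of PySem.Chars.replace for a one-char pattern
def expandComma : List Char → List Char :=
  List.flatMap (fun c => if c = ',' then [' ', ',', ' '] else [c])

theorem replace_go_eq (fuel : Nat) : ∀ (l acc : List Char), l.length ≤ fuel →
    PySem.Chars.replace.go [','] [' ', ',', ' '] fuel l acc = acc.reverse ++ expandComma l := by
  induction fuel with
  | zero =>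
    intro l acc h
    have : l = [] := by cases l <;> simp_all
    subst this
    simp [PySem.Chars.replace.go, expandComma]
  | succ fuel ih =>
    intro l acc h
    cases l with
    | nil => simp [PySem.Chars.replace.go, expandComma]
    | cons c rest =>
      rw [PySem.Chars.replace.go]
      simp only [List.length_cons] at h
      by_cases hc : c = ','
      · subst hc
        simp only [List.isPrefixOf, BEq.rfl, Bool.true_and, if_true, List.length_cons,
          List.drop_succ_cons, List.length_nil, List.drop_zero]
        rw [ih rest _ (by omega)]
        simp [expandComma]
      · have hpre : [','].isPrefixOf (c :: rest) = false := by
          simp [List.isPrefixOf, beq_eq_false_iff_ne]; exact fun hh => hc hh.symm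
        simp only [hpre, if_false, Bool.false_eq_true]
        rw [ih rest _ (by omega)]
        simp [expandComma, hc]

theorem replace_eq (s : List Char) :
    PySem.Chars.replace s [','] [' ', ',', ' '] = expandComma s := by
  have := replace_go_eq s.length s [] (le_refl _)
  simpa [PySem.Chars.replace] using this

theorem filter_mysplit_expand (cs : List Char) : ∀ (pre : List Char),
    (mysplit ' ' (expandComma cs) pre).filter (fun l => l ≠ []) = tokSpec pre cs := by
  induction cs with
  | nil => intro pre; simp [expandComma, mysplit, tokSpec]; split_ifs <;> simp_all
  | cons c rest ih =>
    intro pre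
    simp only [expandComma] at ih ⊢
    by_cases hc : c = ','
    · subst hc
      simp only [List.flatMap_cons, List.cons_append, List.nil_append, mysplit,
        if_neg (by decide : ¬ (',' = ' ')), eq_self_iff_true, ite_true, List.filter_cons]
      rw [ih []]
      simp only [tokSpec, eq_self_iff_true, ite_true]
      split_ifs <;> simp_all
    · by_cases hs : c = ' '
      · subst hs
        simp only [List.flatMap_cons, if_neg hc, List.singleton_append, mysplit,
          eq_self_iff_true, ite_true, List.filter_cons]
        rw [ih []]
        simp only [tokSpec, if_neg hc, eq_self_iff_true, ite_true]
        split_ifs <;> simp_all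
      · simp only [List.flatMap_cons, if_neg hc, List.singleton_append, mysplit, if_neg hs]
        rw [ih (pre ++ [c])]
        simp [tokSpec, hc, hs]

-- the two tokenizers agree
theorem tokenizers_eq (line : String) :
    ((PySem.Str.split? (PySem.Str.replace line "," " , ") " ").getD []).filter (fun t => t ≠ "") =
    tokenize_line line := by
  have e1 : ("," : String).toList = [','] := by decide
  have e2 : (" , " : String).toList = [' ', ',', ' '] := by decide
  have e3 : (" " : String).toList = [' '] := by decide
  have h1 : (PySem.Str.replace line "," " , ").toList = expandComma line.toList := by
    rw [PySem.Str.toList_replace, e1, e2, replace_eq]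
  have h2 : PySem.Str.split? (PySem.Str.replace line "," " , ") " " =
      some ((mysplit ' ' (expandComma line.toList) []).map String.ofList) := by
    rw [PySem.Str.split?, e3, h1, PySem.Chars.split?]
    simp [splitOn_eq]
  rw [h2]
  rw [Option.getD_some]
  rw [List.filter_map]
  have hpred : ((fun t => decide (t ≠ "")) ∘ String.ofList) = (fun l => decide (l ≠ [])) := by
    funext l
    simp only [Function.comp_apply, decide_eq_decide, ne_eq, not_iff_not]
    exact String.ofList_eq_empty_iff
  rw [hpred, filter_mysplit_expand]
  have : tokenize_line line =
      (tokFinish (line.toList.foldl tokStepA ([], []))).map String.ofList := rfl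
  rw [this, tokA_eq_tokSpec]
  simp

-- common merge specification: two tokens at a time
def mergeSpec (decisions : List (String × String × String)) : List String → List String
  | [] => []
  | [t] => [t]
  | t1 :: t2 :: rest =>
    if t1 ≠ "," ∧ t2 ≠ "," ∧
        pvLookup decisions (PySem.Str.lower t1, PySem.Str.lower t2) = some "merge" then
      pvCat t1 t2 :: mergeSpec decisions rest
    else t1 :: mergeSpec decisions (t2 :: rest)

theorem mergeA_eq_spec (decisions : List (String × String × String)) (tokens : List String)
    (i : Nat) (acc : List String) :
    mergeAGo decisions tokens i acc = acc ++ mergeSpec decisions (tokens.drop i) := by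
  fun_induction mergeAGo decisions tokens i acc with
  | case1 i acc h t hc ih =>
    rw [ih, List.drop_eq_getElem_cons h]
    have hgi : tokens[i] = "," := by rw [← List.getD_eq_getElem _ _ h]; exact hc
    rcases tokens.drop (i+1) with _ | ⟨t2, rest⟩
    · simp [mergeSpec, hgi]
    · simp [mergeSpec, hgi]
  | case2 i acc h t hc hm ih =>
    rw [ih]
    have h1 : i + 1 < tokens.length := by omega
    rw [List.drop_eq_getElem_cons h, List.drop_eq_getElem_cons h1]
    obtain ⟨hlt, hn2, hmm⟩ := hm
    have hg : tokens[i] = t := (List.getD_eq_getElem _ _ h).symm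
    have hg1 : tokens[i+1] = tokens.getD (i+1) "" := (List.getD_eq_getElem _ _ h1).symm
    simp only [mergeSpec, hg, hg1]
    rw [if_pos ⟨hc, hn2, hmm⟩]
    simp
  | case3 i acc h t hc hm ih =>
    rw [ih, List.drop_eq_getElem_cons h]
    have hg : tokens[i] = t := (List.getD_eq_getElem _ _ h).symm
    rcases hrest : tokens.drop (i+1) with _ | ⟨t2, rest⟩
    · simp [mergeSpec, hg]
    · have h1 : i + 1 < tokens.length := by
        by_contra hh
        rw [List.drop_eq_nil_iff.mpr (by omega)] at hrest
        exact (List.cons_ne_nil _ _) hrest.symm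
      have hlt : i < tokens.length - 1 := by omega
      have ht2 : t2 = tokens.getD (i+1) "" := by
        rw [List.drop_eq_getElem_cons h1] at hrest
        rw [((List.cons.injEq _ _ _ _).mp hrest).1.symm]
        exact (List.getD_eq_getElem _ _ h1).symm
      simp only [mergeSpec, hg]
      rw [if_neg]
      · simp
      · rintro ⟨hn1, hn2, hmm⟩
        exact hm ⟨hlt, by rw [← ht2]; exact hn2, by rw [← ht2]; exact hmm⟩
  | case4 i acc h =>
    rw [List.drop_eq_nil_iff.mpr (by omega)]
    simp [mergeSpec]

theorem mergeB_eq_spec (decisions : List (String × String × String)) (toks : List String) :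
    ∀ (acc : List String),
    ((toks.zip (toks.drop 1 ++ [","])).foldl
      (fun (st : List String × Bool) p =>
        if st.2 then (st.1, false)
        else if p.1 ≠ "," ∧ p.2 ≠ "," ∧
            pvLookup decisions (PySem.Str.lower p.1, PySem.Str.lower p.2) = some "merge" then
          (st.1 ++ [pvCat p.1 p.2], true)
        else (st.1 ++ [p.1], false)) (acc, false)).1 = acc ++ mergeSpec decisions toks := by
  induction toks using mergeSpec.induct decisions with
  | case1 => intro acc; simp [mergeSpec]
  | case2 t => intro acc; simp [mergeSpec]
  | case3 t1 t2 rest hm ih =>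
    intro acc
    simp only [List.drop_succ_cons, List.drop_zero, List.cons_append, List.zip_cons_cons,
      List.foldl_cons, if_neg (by simp : ¬ (false = true)), if_pos hm]
    cases rest with
    | nil =>
      simp [mergeSpec, hm]
    | cons r rs =>
      simp only [List.cons_append, List.zip_cons_cons, List.foldl_cons,
        eq_self_iff_true, ite_true]
      have := ih (acc ++ [pvCat t1 t2])
      simp only [List.drop_succ_cons, List.drop_zero] at this
      rw [this]
      simp [mergeSpec, hm]
  | case4 t1 t2 rest hm ih =>
    intro acc
    simp only [List.drop_succ_cons, List.drop_zero, List.cons_append, List.zip_cons_cons,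
      List.foldl_cons, if_neg (by simp : ¬ (false = true)), if_neg hm]
    have := ih (acc ++ [t1])
    simp only [List.drop_succ_cons, List.drop_zero] at this
    rw [this]
    simp [mergeSpec, hm]

-- join: A's per-index piece, and the sequential forms goA (trailing-space rule) / goB (leading-sep rule)
def pieceA (toks : List String) (n j : Nat) : List Char :=
  if toks.getD j "" = "," then ',' :: (if j < n - 1 then [' '] else [])
  else (if 0 < j ∧ toks.getD (j - 1) "" ≠ "," then [' '] else []) ++ (toks.getD j "").toList

def goA (prev : String) : List String → List Char
  | [] => []
  | c :: rest =>
    (if c = "," then ',' :: (if rest ≠ [] then [' '] else [])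
     else (if prev ≠ "," then [' '] else []) ++ c.toList) ++ goA c rest

def goB (prev : String) : List String → List Char
  | [] => []
  | c :: rest =>
    (if c = "," ∧ prev ≠ "," then [','] else ' ' :: c.toList) ++ goB c rest

theorem joinAStep_toList (toks : List String) (n : Nat) (r : String) (j : Nat) :
    (joinAStep toks n r j).toList = r.toList ++ pieceA toks n j := by
  unfold joinAStep pieceA
  split_ifs with h1 h2 h3 <;> simp [pvCat, String.toList_ofList]

theorem joinA_fold_toList (toks : List String) (n : Nat) (l : List Nat) : ∀ (r : String),
    (l.foldl (joinAStep toks n) r).toList = r.toList ++ (l.map (pieceA toks n)).flatten := by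
  induction l with
  | nil => intro r; simp
  | cons j l ih => intro r; simp [ih, joinAStep_toList]

theorem pieceA_shift (prev : String) (ts : List String) (j : Nat) :
    pieceA (prev :: ts) (ts.length + 1) (j + 2) = pieceA ts ts.length (j + 1) := by
  unfold pieceA
  have e1 : j + 2 - 1 = j + 1 := rfl
  simp only [List.getD_cons_succ, e1]
  simp only [show (j + 2 < ts.length) ↔ (j + 1 < ts.length - 1) from by omega,
      show (0 < j + 2) ↔ True from iff_true_intro (by omega),
      show (0 < j + 1) ↔ True from iff_true_intro (by omega), true_and, Nat.add_sub_cancel]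

theorem flatten_pieceA_eq_goA (ts : List String) : ∀ (prev : String),
    ((List.range ts.length).map (fun j => pieceA (prev :: ts) (ts.length + 1) (j + 1))).flatten =
    goA prev ts := by
  induction ts with
  | nil => intro prev; simp [goA]
  | cons c rest ih =>
    intro prev
    simp only [List.length_cons]
    rw [List.range_succ_eq_map]
    simp only [List.map_cons, List.map_map, List.flatten_cons]
    rw [show ((fun j => pieceA (prev :: c :: rest) (rest.length + 1 + 1) (j + 1)) ∘ (· + 1)) =
        (fun j => pieceA (c :: rest) (rest.length + 1) (j + 1)) from
      funext (fun j => pieceA_shift prev (c :: rest) j)]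
    rw [ih c]
    show pieceA (prev :: c :: rest) (rest.length + 1 + 1) 1 ++ goA c rest = goA prev (c :: rest)
    unfold goA pieceA
    simp only [List.getD_cons_succ, List.getD_cons_zero]
    simp only [show (1 < rest.length + 1 + 1 - 1) ↔ (rest ≠ []) from by
      constructor
      · intro h he; subst he; simp at h
      · intro h; have := List.length_pos_of_ne_nil h; omega,
      show (0 < 1) ↔ True from iff_true_intro (by omega), true_and, Nat.sub_self]
    simp only [List.getD_cons_zero]
    cases rest <;> rfl

theorem goB_eq_goA (ts : List String) : ∀ (prev : String),
    goB prev ts = (if prev = "," ∧ ts ≠ [] then [' '] else []) ++ goA prev ts := by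
  induction ts with
  | nil => intro prev; simp [goB, goA]
  | cons c rest ih =>
    intro prev
    by_cases hc : c = ","
    · subst hc
      by_cases hp : prev = ","
      · subst hp
        by_cases hr : rest = [] <;> simp [goB, goA, ih, hr]
      · by_cases hr : rest = [] <;> simp [goB, goA, ih, hp, hr]
    · by_cases hp : prev = ","
      · subst hp
        simp [goB, goA, ih, hc]
      · simp [goB, goA, ih, hc, hp]

theorem flatten_pieceB_eq_goB (ts : List String) : ∀ (prev : String),
    ((((prev :: ts).zip ts).map
      (fun p => if p.2 = "," ∧ p.1 ≠ "," then p.2 else pvCat " " p.2)).map String.toList).flatten =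
    goB prev ts := by
  induction ts with
  | nil => intro prev; simp [goB]
  | cons c rest ih =>
    intro prev
    simp only [List.zip_cons_cons, List.map_cons, List.flatten_cons, ih c]
    show String.toList (if c = "," ∧ prev ≠ "," then c else pvCat " " c) ++ goB c rest = _
    by_cases hc : c = "," ∧ prev ≠ ","
    · rw [if_pos hc, goB, if_pos hc]
      rw [hc.1]
      rfl
    · rw [if_neg hc, goB, if_neg hc]
      simp [pvCat]

theorem join_empty_sep (ps : List (List Char)) : PySem.Chars.join [] ps = ps.flatten := by
  simp [PySem.Chars.join, List.intercalate]
  induction ps with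
  | nil => rfl
  | cons p ps ih => cases ps <;> simp_all [List.intersperse]

theorem joins_eq (toks : List String) :
    (List.range toks.length).foldl (joinAStep toks toks.length) "" =
    PySem.Str.join "" (toks.take 1 ++ (toks.zip (toks.drop 1)).map
      (fun p => if p.2 = "," ∧ p.1 ≠ "," then p.2 else pvCat " " p.2)) := by
  apply String.toList_inj.mp
  rw [joinA_fold_toList, PySem.Str.toList_join]
  rw [show ("" : String).toList = ([] : List Char) from rfl]
  rw [join_empty_sep, List.nil_append]
  cases toks with
  | nil => simp
  | cons t rest =>
    simp only [List.length_cons]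
    rw [List.range_succ_eq_map]
    simp only [List.map_cons, List.map_map, List.flatten_cons]
    rw [show ((fun j => pieceA (t :: rest) (rest.length + 1) j) ∘ (· + 1)) =
        (fun j => pieceA (t :: rest) (rest.length + 1) (j + 1)) from rfl]
    rw [flatten_pieceA_eq_goA rest t]
    simp only [List.take_succ_cons, List.take_zero, List.drop_succ_cons, List.drop_zero,
      List.cons_append, List.nil_append, List.map_cons, List.flatten_cons]
    rw [flatten_pieceB_eq_goB rest t, goB_eq_goA]
    unfold pieceA
    simp only [List.getD_cons_zero]
    by_cases hc : t = ","
    · subst hc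
      by_cases hr : rest = []
      · subst hr; simp
      · have hpos : (0 : Nat) < rest.length := List.length_pos_of_ne_nil hr
        simp [hr, hpos]
    · simp [hc]

-- ===== VERDICT (by name: the statement is the Claim_ definition above) =====
theorem apply_decisions_spec : Claim_equal_apply_decisions := by
  intro lines decisions _
  unfold Spec_apply_decisions apply_decisions apply_decisions_alt
  apply List.map_congr_left
  intro line _
  dsimp only
  rw [tokenizers_eq]
  rw [mergeA_eq_spec, mergeB_eq_spec]
  simp only [List.drop_zero, List.nil_append]
  exact joins_eq _
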